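-- pv_equiv track=rewrite | github.com/UPI05/cryptography | vignere.py | repeat_key
-- ===== SOURCE A (Python) =====
-- import math
--
-- def repeat_key(t, k):
--     key = ""
--     key_with_spaces = ""
--     for i in range(math.ceil(len(t) / len(k))):
--         key += k
--     cnt = 0
--     for x in t:
--         if ord(x) < ord('A') or ord(x) > ord('Z'):
--             key_with_spaces += x
--         else:
--             key_with_spaces += key[cnt]
--             cnt += 1
--     return key_with_spaces
-- ===== SOURCE B (Python) =====
-- def repeat_key(t, k):
--     out = list(t)
--     positions = [i for i, x in enumerate(t) if 'A' <= x <= 'Z']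
--     q, r = divmod(len(positions), len(k))
--     key_chars = k * q + k[:r]
--     for i, c in zip(positions, key_chars):
--         out[i] = c
--     return ''.join(out)
-- ===== Notes on version B (the rewrite author's own statement) =====
-- stated objective: alternative
-- what changed: B replaces A's counter-driven char-by-char accumulation over a pre-repeated key by a staged scatter: it first collects the uppercase positions, builds an exactly-sized key stream with divmod, and assigns it into a mutable copy of t at those positions.
import Mathlib
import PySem

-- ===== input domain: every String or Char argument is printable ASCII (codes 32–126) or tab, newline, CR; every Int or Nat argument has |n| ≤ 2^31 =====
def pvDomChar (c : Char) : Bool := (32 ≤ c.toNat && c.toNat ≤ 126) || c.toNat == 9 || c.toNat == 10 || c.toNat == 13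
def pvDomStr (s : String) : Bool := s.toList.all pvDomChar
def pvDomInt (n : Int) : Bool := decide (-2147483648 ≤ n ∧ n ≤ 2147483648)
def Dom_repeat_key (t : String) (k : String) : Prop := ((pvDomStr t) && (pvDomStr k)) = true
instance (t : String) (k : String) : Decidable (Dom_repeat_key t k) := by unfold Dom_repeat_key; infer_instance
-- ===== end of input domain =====

-- B replaces A's cnt-counter accumulation over a pre-repeated key by a staged scatter: it collects
-- the uppercase positions, builds an exactly-sized key stream via divmod, and assigns it into a
-- mutable copy of t at those positions (objective: alternative decomposition; equal return values for k ≠ "").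


-- ===== PORT A =====
-- A's first loop: key = ""; key += k, math.ceil(len(t)/len(k)) times.  The ceiling is the exact
-- integer ceiling (t.len + k.len - 1) / k.len (floats are exact at these sizes); for k = "" Python
-- raises ZeroDivisionError here (excluded by Pre_; Nat division by 0 below yields 0 instead).
def repeatKeyBuild (t : String) (k : String) : List Char :=
  (List.range ((t.toList.length + k.toList.length - 1) / k.toList.length)).foldl
    (fun acc _ => acc ++ k.toList) []

-- A's second loop; key[cnt]: cnt ≥ 0 always, and cnt < len(key) whenever k ≠ "", so the
-- default ' ' of getD is unreachable under Pre_ (Python raises IndexError out of range).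
def repeat_key (t : String) (k : String) : String :=
  String.ofList ((t.toList.foldl
    (fun (st : List Char × Nat) x =>
      if x.toNat < 'A'.toNat ∨ 'Z'.toNat < x.toNat then (st.1 ++ [x], st.2)
      else (st.1 ++ [(repeatKeyBuild t k).getD st.2 ' '], st.2 + 1))
    (([] : List Char), 0)).1)

-- ===== PORT B =====
-- Source B: out = list(t); positions = [i for i, x in enumerate(t) if 'A' <= x <= 'Z'];
-- q, r = divmod(len(positions), len(k)) (both non-negative, so Python divmod = Nat div/mod;
-- raises ZeroDivisionError for k = "", excluded by Pre_); key_chars = k * q + k[:r];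
-- for i, c in zip(positions, key_chars): out[i] = c  (every i < len(out), so List.set is exact);
-- return ''.join(out).  enumerate(t) gives (i, x); Lean's zipIdx gives (x, i).
-- uppercase positions of xs (B's `positions` list; enumerate(t) gives (i, x), zipIdx gives (x, i))
def uposOf (xs : List Char) : List Nat :=
  ((xs.zipIdx).filter (fun p => decide ('A' ≤ p.1 ∧ p.1 ≤ 'Z'))).map (·.2)

def repeat_key_alt (t : String) (k : String) : String :=
  let out := t.toList
  let positions := uposOf t.toList
  let q := positions.length / k.toList.length
  let r := positions.length % k.toList.length
  let key_chars := (List.replicate q k.toList).flatten ++ k.toList.take r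
  String.ofList ((positions.zip key_chars).foldl (fun o p => o.set p.1 p.2) out)

-- ===== PRECONDITION & SPEC =====
-- Pre_ excludes exactly k = "", on which both Pythons raise ZeroDivisionError.
def Pre_repeat_key (t : String) (k : String) : Prop := k ≠ ""
instance (t : String) (k : String) : Decidable (Pre_repeat_key t k) := by unfold Pre_repeat_key; infer_instance
def pvWitness_repeat_key : String × String := ("HELLO, World!", "KEY")

def Spec_repeat_key (t : String) (k : String) (out : String) : Prop := out = repeat_key_alt t k
instance (t : String) (k : String) (out : String) : Decidable (Spec_repeat_key t k out) := by unfold Spec_repeat_key; infer_instance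

-- ===== CLAIM (what is proved, stated in full; the proofs are below) =====
def Claim_equal_repeat_key : Prop := ∀ (t : String) (k : String), Dom_repeat_key t k → Pre_repeat_key t k → Spec_repeat_key t k (repeat_key t k)

-- ===== LEMMAS AND PROOFS =====

-- Common specification: replace each uppercase letter by the next unconsumed char of ks.
def keySub (xs : List Char) (ks : List Char) : List Char :=
  match xs with
  | [] => []
  | x :: tl =>
    if 'A' ≤ x ∧ x ≤ 'Z' then (ks.head?.getD ' ') :: keySub tl ks.tail
    else x :: keySub tl ks

-- count of uppercase letters
def ucount (xs : List Char) : Nat := xs.countP (fun x => decide ('A' ≤ x ∧ x ≤ 'Z'))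

theorem ucount_cons (x : Char) (xs : List Char) :
    ucount (x :: xs) = (if 'A' ≤ x ∧ x ≤ 'Z' then 1 else 0) + ucount xs := by
  by_cases h : 'A' ≤ x ∧ x ≤ 'Z' <;> simp [ucount, List.countP_cons, h] <;> omega

-- keySub only looks at the first ucount entries of the key stream.
theorem keySub_congr : ∀ (xs ks1 ks2 : List Char),
    (∀ j, j < ucount xs → ks1.getD j ' ' = ks2.getD j ' ') → keySub xs ks1 = keySub xs ks2 := by
  intro xs
  induction xs with
  | nil => intro _ _ _; rfl
  | cons x tl ih =>
    intro ks1 ks2 h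
    by_cases hx : 'A' ≤ x ∧ x ≤ 'Z'
    · have h0 : ks1.head?.getD ' ' = ks2.head?.getD ' ' := by
        have := h 0 (by rw [ucount_cons, if_pos hx]; omega)
        simpa [List.getD, List.head?_eq_getElem?] using this
      have ht : keySub tl ks1.tail = keySub tl ks2.tail := by
        apply ih
        intro j hj
        cases ks1 <;> cases ks2 <;>
          simpa [List.getD] using h (j + 1) (by rw [ucount_cons, if_pos hx]; omega)
      simp [keySub, if_pos hx, h0, ht]
    · simp [keySub, if_neg hx, ih ks1 ks2 (by intro j hj; exact h j (by rw [ucount_cons, if_neg hx]; omega))]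

-- A's key-building loop yields the key list repeated n times.
theorem key_build_eq (l : List Char) (n : Nat) (acc : List Char) :
    (List.range n).foldl (fun acc _ => acc ++ l) acc = acc ++ (List.replicate n l).flatten := by
  induction n generalizing acc with
  | zero => simp
  | succ m ih =>
    rw [List.range_succ, List.foldl_append, ih, List.replicate_succ']
    simp [List.foldl]

-- the two branch conditions are complementary
theorem cond_compl (x : Char) :
    (x.toNat < 'A'.toNat ∨ 'Z'.toNat < x.toNat) ↔ ¬('A' ≤ x ∧ x ≤ 'Z') := by
  simp only [Char.le_def, UInt32.le_iff_toNat_le, Char.toNat]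
  omega

-- A's main loop computes keySub, consuming the key stream from index cnt on.
theorem foldA_eq (key : List Char) : ∀ (xs : List Char) (cnt : Nat) (acc : List Char),
    (xs.foldl
      (fun (st : List Char × Nat) x =>
        if x.toNat < 'A'.toNat ∨ 'Z'.toNat < x.toNat then (st.1 ++ [x], st.2)
        else (st.1 ++ [key.getD st.2 ' '], st.2 + 1)) (acc, cnt)).1
    = acc ++ keySub xs (key.drop cnt) := by
  intro xs
  induction xs with
  | nil => intro cnt acc; simp [keySub]
  | cons x tl ih =>
    intro cnt acc
    by_cases hx : 'A' ≤ x ∧ x ≤ 'Z'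
    · have hA : ¬(x.toNat < 'A'.toNat ∨ 'Z'.toNat < x.toNat) := by
        rw [cond_compl]; exact not_not_intro hx
      have hkey : key.getD cnt ' ' = (key.drop cnt).head?.getD ' ' := by
        simp [List.getD, List.head?_drop]
      simp only [List.foldl_cons, if_neg hA, ih (cnt + 1) _, keySub, if_pos hx, hkey,
        List.tail_drop, List.append_assoc, List.singleton_append]
    · have hA : (x.toNat < 'A'.toNat ∨ 'Z'.toNat < x.toNat) := (cond_compl x).mpr hx
      simp only [List.foldl_cons, if_pos hA, ih cnt _, keySub, if_neg hx,
        List.append_assoc, List.singleton_append]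

theorem uposOf_cons (x : Char) (xs : List Char) :
    uposOf (x :: xs) =
      (if 'A' ≤ x ∧ x ≤ 'Z' then [0] else []) ++ (uposOf xs).map (· + 1) := by
  by_cases hx : 'A' ≤ x ∧ x ≤ 'Z' <;>
    simp [uposOf, List.zipIdx_succ, List.filter_map, List.map_map, hx, Function.comp_def]

theorem length_uposOf (xs : List Char) : (uposOf xs).length = ucount xs := by
  induction xs with
  | nil => rfl
  | cons x tl ih =>
    rw [uposOf_cons, ucount_cons]
    by_cases hx : 'A' ≤ x ∧ x ≤ 'Z' <;> simp [hx, ih] <;> omega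

-- scatter at indices all shifted by one leaves the head alone
theorem foldl_set_shift (ps : List (Nat × Char)) : ∀ (a : Char) (out : List Char),
    (ps.map (fun p => (p.1 + 1, p.2))).foldl (fun o p => o.set p.1 p.2) (a :: out)
      = a :: ps.foldl (fun o p => o.set p.1 p.2) out := by
  induction ps with
  | nil => intro a out; rfl
  | cons p tl ih => intro a out; simp [List.foldl_cons, List.set_cons_succ, ih]

-- B's scatter fold computes keySub when the key stream has exactly ucount entries.
theorem foldB_eq : ∀ (xs ks : List Char), ks.length = ucount xs →
    ((uposOf xs).zip ks).foldl (fun o p => o.set p.1 p.2) xs = keySub xs ks := by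
  intro xs
  induction xs with
  | nil => intro ks _; rfl
  | cons x tl ih =>
    intro ks hlen
    rw [ucount_cons] at hlen
    rw [uposOf_cons]
    by_cases hx : 'A' ≤ x ∧ x ≤ 'Z'
    · rw [if_pos hx] at hlen ⊢
      cases ks with
      | nil => simp at hlen; omega
      | cons c ks' =>
        have hzip : ((uposOf tl).map (· + 1)).zip ks'
            = ((uposOf tl).zip ks').map (fun p => (p.1 + 1, p.2)) := by
          simpa [Prod.map] using
            (List.zip_map_left (f := (· + 1)) (l₁ := uposOf tl) (l₂ := ks'))
        simp only [List.singleton_append, List.zip_cons_cons, List.foldl_cons, List.set_cons_zero,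
          hzip, foldl_set_shift, keySub, if_pos hx, List.head?_cons, Option.getD_some, List.tail_cons]
        rw [ih ks' (by simp only [List.length_cons] at hlen; omega)]
    · rw [if_neg hx] at hlen ⊢
      have hzip : ((uposOf tl).map (· + 1)).zip ks
          = ((uposOf tl).zip ks).map (fun p => (p.1 + 1, p.2)) := by
        simpa [Prod.map] using
          (List.zip_map_left (f := (· + 1)) (l₁ := uposOf tl) (l₂ := ks))
      simp only [List.nil_append, hzip, foldl_set_shift, keySub, if_neg hx]
      rw [ih ks (by omega)]

-- Indexing the n-fold repetition of l equals indexing l modulo its length.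
theorem getD_flatten_replicate (l : List Char) : ∀ (n i : Nat), i < n * l.length →
    ((List.replicate n l).flatten).getD i ' ' = l.getD (i % l.length) ' ' := by
  intro n
  induction n with
  | zero => intro i h; omega
  | succ m ih =>
    intro i h
    have hsm : (m + 1) * l.length = m * l.length + l.length := Nat.succ_mul _ _
    rw [List.replicate_succ, List.flatten_cons]
    by_cases hi : i < l.length
    · rw [List.getD_append _ _ _ _ hi, Nat.mod_eq_of_lt hi]
    · push_neg at hi
      rw [List.getD_append_right _ _ _ _ hi, ih (i - l.length) (by omega),
        Nat.mod_eq_sub_mod hi]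

-- a ≤ ceil(a/b) * b for b > 0, with ceil(a/b) = (a + b - 1) / b.
theorem le_ceil_mul (a b : Nat) (hb : 0 < b) : a ≤ ((a + b - 1) / b) * b := by
  have h := Nat.div_add_mod (a + b - 1) b
  have h2 : (a + b - 1) % b < b := Nat.mod_lt _ hb
  rw [Nat.mul_comm]
  generalize hp : b * ((a + b - 1) / b) = p at h ⊢
  omega

-- B's exactly-sized key stream also indexes as l modulo its length (for j below its length).
theorem getD_keychars (l : List Char) (n j : Nat) (hl : 0 < l.length) (hj : j < n) :
    ((List.replicate (n / l.length) l).flatten ++ l.take (n % l.length)).getD j ' '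
      = l.getD (j % l.length) ' ' := by
  have hflat : ((List.replicate (n / l.length) l).flatten).length = (n / l.length) * l.length := by
    simp [Nat.mul_comm]
  by_cases hcase : j < (n / l.length) * l.length
  · rw [List.getD_append _ _ _ _ (by omega), getD_flatten_replicate l _ j hcase]
  · rw [Nat.not_lt] at hcase
    have hdm := Nat.div_add_mod n l.length
    have hq : l.length * (n / l.length) = (n / l.length) * l.length := Nat.mul_comm _ _
    have hsub : j - (n / l.length) * l.length < n % l.length := by omega
    have hjm : j % l.length = j - (n / l.length) * l.length := by
      have hje : j = l.length * (n / l.length) + (j - (n / l.length) * l.length) := by omega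
      calc j % l.length
          = (l.length * (n / l.length) + (j - (n / l.length) * l.length)) % l.length := by
            rw [← hje]
        _ = (j - (n / l.length) * l.length) % l.length := Nat.mul_add_mod _ _ _
        _ = j - (n / l.length) * l.length :=
            Nat.mod_eq_of_lt (by have := Nat.mod_lt n hl; omega)
    rw [List.getD_append_right _ _ _ _ (by omega), hflat, hjm,
      List.getD_eq_getElem?_getD, List.getElem?_take_of_lt hsub, ← List.getD_eq_getElem?_getD]

-- ===== VERDICT (by name: the statement is the Claim_ definition above) =====
theorem repeat_key_spec : Claim_equal_repeat_key := by
  intro t k _ hpre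
  have hk : k.toList ≠ [] := by simpa using hpre
  have hkl : 0 < k.toList.length := List.length_pos_iff.mpr hk
  unfold Spec_repeat_key repeat_key repeat_key_alt
  -- A's pre-built key
  have hkey : repeatKeyBuild t k =
      (List.replicate ((t.toList.length + k.toList.length - 1) / k.toList.length) k.toList).flatten := by
    unfold repeatKeyBuild; rw [key_build_eq]; simp
  rw [hkey, foldA_eq _ t.toList 0 [], List.drop_zero, List.nil_append]
  -- B's scatter fold
  have hlen : ((List.replicate ((uposOf t.toList).length / k.toList.length) k.toList).flatten
      ++ k.toList.take ((uposOf t.toList).length % k.toList.length)).length = ucount t.toList := by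
    have hmin : (uposOf t.toList).length % k.toList.length ≤ k.toList.length :=
      Nat.le_of_lt (Nat.mod_lt _ hkl)
    have hflat : ((List.replicate ((uposOf t.toList).length / k.toList.length) k.toList).flatten).length
        = ((uposOf t.toList).length / k.toList.length) * k.toList.length := by
      simp [Nat.mul_comm]
    rw [List.length_append, hflat, List.length_take, Nat.min_eq_left hmin, length_uposOf,
      Nat.mul_comm, Nat.div_add_mod]
  show String.ofList _ = String.ofList _
  rw [foldB_eq t.toList _ hlen]
  congr 1
  apply keySub_congr
  intro j hj
  have hucl : ucount t.toList ≤ t.toList.length := List.countP_le_length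
  have hceil := le_ceil_mul t.toList.length k.toList.length hkl
  rw [getD_flatten_replicate k.toList _ j (by omega),
    getD_keychars k.toList _ j hkl (by rwa [length_uposOf])]
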